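-- pv_equiv track=rewrite | github.com/NateRoe1914/Assignment-6--Recursion | recursion.py | split_53_helper
-- ===== SOURCE A (Python) =====
-- def split_53_helper(start, nums, target):
--     """
--     Given a list of ints, determine if the numbers can be split evenly into two groups
--     The sum of these two groups must be equal
--     Additionally, all multiples of 5 must be in one group, and all multiples of 3 (and not 5)
--     must be in the other group
--     Write a recursive helper to call from this function
--
--     pre: len(nums) >= 0, nums will only contain ints
--     post: return True if nums can be split, False otherwise
--     """
--     if target == 0:
--         return True
--     if start >= len(nums) or target < 0:
--         return False
--
--     if nums[start] % 5 == 0: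
--         return split_53_helper(start + 1, nums, target - nums[start])
--     if nums[start] % 3 == 0:
--         return split_53_helper(start + 1, nums, target)
--
--     if split_53_helper(start + 1,  nums, target - nums[start]):
--         return True
--
--     return split_53_helper(start + 1, nums, target)
-- ===== SOURCE B (Python) =====
-- def split_53_helper(start, nums, target):
--     # Level-by-level breadth-first DP over the set of reachable residual targets
--     # (duplicate subproblems collapse), instead of A's branching recursion.
--     n = len(nums)
--     states = {target}
--     i = start
--     while i < n:
--         if 0 in states:
--             return True
--         states = {t for t in states if t > 0}
--         if not states:
--             return False
--         x = nums[i]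
--         if x % 5 == 0:
--             states = {t - x for t in states}
--         elif x % 3 != 0:
--             states = states | {t - x for t in states}
--         i += 1
--     return 0 in states
-- ===== Notes on version B (the rewrite author's own statement) =====
-- stated objective: alternative
-- what changed: Replaced A's branching recursion on (index, residual target) by an iterative level-by-level BFS/DP that carries the set of reachable residual targets, so duplicate subproblems collapse into one set element.
import Mathlib
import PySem

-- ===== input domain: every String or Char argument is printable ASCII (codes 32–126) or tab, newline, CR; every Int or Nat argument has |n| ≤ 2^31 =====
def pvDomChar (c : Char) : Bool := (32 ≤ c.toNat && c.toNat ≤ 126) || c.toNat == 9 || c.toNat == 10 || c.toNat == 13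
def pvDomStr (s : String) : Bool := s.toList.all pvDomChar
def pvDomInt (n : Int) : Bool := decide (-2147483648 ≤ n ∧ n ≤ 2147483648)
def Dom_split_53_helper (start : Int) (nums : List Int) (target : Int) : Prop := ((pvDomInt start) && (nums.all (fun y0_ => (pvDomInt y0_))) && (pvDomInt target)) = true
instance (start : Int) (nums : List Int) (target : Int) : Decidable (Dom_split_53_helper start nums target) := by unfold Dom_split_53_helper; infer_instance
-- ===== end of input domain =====

-- B replaces A's branching recursion by an iterative level-by-level DP over the set of
-- reachable residual targets (objective: alternative; return values are identical on Pre_).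

-- ===== PORT A =====
-- nums[start] → pyGet?; .getD 0 is never taken on Pre_ (IndexError inputs are excluded by Pre_).
-- fuel = (len(nums) - start).toNat only makes the recursion structural; it never changes a value.
def split53Ago (fuel : Nat) (start : Int) (nums : List Int) (target : Int) : Bool :=
  match fuel with
  | 0 => if target = 0 then true else false
  | fuel + 1 =>
    if target = 0 then true
    else if (nums.length : Int) ≤ start ∨ target < 0 then false
    else
      let x := (PySem.List.pyGet? nums start).getD 0
      if PySem.Int.mod x 5 = 0 then split53Ago fuel (start + 1) nums (target - x)
      else if PySem.Int.mod x 3 = 0 then split53Ago fuel (start + 1) nums target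
      else if split53Ago fuel (start + 1) nums (target - x) then true
      else split53Ago fuel (start + 1) nums target

def split_53_helper (start : Int) (nums : List Int) (target : Int) : Bool :=
  split53Ago ((nums.length : Int) - start).toNat start nums target

-- ===== PORT B =====
-- the while loop of Source B; states is a Python set (PySem.Set); same structural fuel
def split53AltGo (fuel : Nat) (nums : List Int) (i : Int) (states : PySem.Set Int) : Bool :=
  match fuel with
  | 0 => PySem.Set.contains states 0
  | fuel + 1 =>
    if i < (nums.length : Int) then
      if PySem.Set.contains states 0 then true
      else
        let states1 : PySem.Set Int := PySem.Set.ofList (states.filter (fun t => decide (0 < t)))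
        if states1 = [] then false
        else
          let x := (PySem.List.pyGet? nums i).getD 0
          let states2 : PySem.Set Int :=
            if PySem.Int.mod x 5 = 0 then PySem.Set.ofList (states1.map (fun t => t - x))
            else if PySem.Int.mod x 3 ≠ 0 then
              PySem.Set.union states1 (PySem.Set.ofList (states1.map (fun t => t - x)))
            else states1
          split53AltGo fuel nums (i + 1) states2
    else PySem.Set.contains states 0

def split_53_helper_alt (start : Int) (nums : List Int) (target : Int) : Bool :=
  split53AltGo ((nums.length : Int) - start).toNat nums start (PySem.Set.ofList [target])

-- ===== PRECONDITION & SPEC =====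
-- Pre_ excludes exactly the inputs where A raises IndexError (target > 0 with start < -len(nums),
-- so the very first nums[start] is out of range); B raises there too.
def Pre_split_53_helper (start : Int) (nums : List Int) (target : Int) : Prop :=
  target ≤ 0 ∨ -(nums.length : Int) ≤ start
instance (start : Int) (nums : List Int) (target : Int) : Decidable (Pre_split_53_helper start nums target) := by unfold Pre_split_53_helper; infer_instance
def pvWitness_split_53_helper : Int × List Int × Int := (0, [5, 2], 7)

def Spec_split_53_helper (start : Int) (nums : List Int) (target : Int) (out : Bool) : Prop := out = split_53_helper_alt start nums target
instance (start : Int) (nums : List Int) (target : Int) (out : Bool) : Decidable (Spec_split_53_helper start nums target out) := by unfold Spec_split_53_helper; infer_instance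

-- ===== CLAIM (what is proved, stated in full; the proofs are below) =====
def Claim_equal_split_53_helper : Prop := ∀ (start : Int) (nums : List Int) (target : Int), Dom_split_53_helper start nums target → Pre_split_53_helper start nums target → Spec_split_53_helper start nums target (split_53_helper start nums target)

-- ===== LEMMAS AND PROOFS =====

theorem fAgo_zero (fuel : Nat) (i : Int) (nums : List Int) :
    split53Ago fuel i nums 0 = true := by
  cases fuel <;> simp [split53Ago]

theorem fAgo_neg (fuel : Nat) (i : Int) (nums : List Int) (t : Int) (h : t < 0) :
    split53Ago fuel i nums t = false := by
  have h0 : ¬ t = 0 := by omega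
  cases fuel with
  | zero => simp [split53Ago, h0]
  | succ k => simp [split53Ago, h0, h]

theorem fAgo_step (k : Nat) (i : Int) (nums : List Int) (t : Int)
    (hi : i < (nums.length : Int)) (ht : 0 < t) :
    split53Ago (k + 1) i nums t =
      (if PySem.Int.mod ((PySem.List.pyGet? nums i).getD 0) 5 = 0 then
         split53Ago k (i + 1) nums (t - (PySem.List.pyGet? nums i).getD 0)
       else if PySem.Int.mod ((PySem.List.pyGet? nums i).getD 0) 3 = 0 then
         split53Ago k (i + 1) nums t
       else (split53Ago k (i + 1) nums (t - (PySem.List.pyGet? nums i).getD 0) ||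
             split53Ago k (i + 1) nums t)) := by
  have h0 : ¬ t = 0 := by omega
  have h1 : ¬ ((nums.length : Int) ≤ i ∨ t < 0) := by omega
  show (if t = 0 then true
        else if (nums.length : Int) ≤ i ∨ t < 0 then false
        else if PySem.Int.mod ((PySem.List.pyGet? nums i).getD 0) 5 = 0 then
          split53Ago k (i + 1) nums (t - (PySem.List.pyGet? nums i).getD 0)
        else if PySem.Int.mod ((PySem.List.pyGet? nums i).getD 0) 3 = 0 then
          split53Ago k (i + 1) nums t
        else if split53Ago k (i + 1) nums (t - (PySem.List.pyGet? nums i).getD 0) = true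
          then true
        else split53Ago k (i + 1) nums t) = _
  rw [if_neg h0, if_neg h1]
  split_ifs with h5 h3 hrec
  · rfl
  · rfl
  · simp [hrec]
  · simp only [Bool.not_eq_true] at hrec
    rw [hrec]
    simp

-- invariant: the loop of B is true iff A is true for some residual target in the state set
theorem split53AltGo_iff (nums : List Int) :
    ∀ fuel (i : Int) (states : PySem.Set Int), ((nums.length : Int) - i).toNat = fuel →
      (split53AltGo fuel nums i states = true ↔
        ∃ t ∈ states, split53Ago fuel i nums t = true) := by
  intro fuel
  induction fuel with
  | zero =>
    intro i states hk
    show PySem.Set.contains states 0 = true ↔ _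
    rw [show (PySem.Set.contains states 0 = true) ↔ (0 : Int) ∈ states from
      PySem.Set.contains_iff states 0]
    constructor
    · intro h; exact ⟨0, h, fAgo_zero 0 i nums⟩
    · rintro ⟨t, hts, hft⟩
      have h0 : t = 0 := by
        cases hc : decide (t = 0) with
        | true => exact of_decide_eq_true hc
        | false =>
          have : ¬ t = 0 := of_decide_eq_false hc
          simp [split53Ago, this] at hft
      simpa [h0] using hts
  | succ k ih =>
    intro i states hk
    have hi : i < (nums.length : Int) := by omega
    show (if i < (nums.length : Int) then _ else _) = true ↔ _
    rw [if_pos hi]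
    by_cases h0 : PySem.Set.contains states 0 = true
    · have h0m : (0 : Int) ∈ states := (PySem.Set.contains_iff states 0).mp h0
      rw [if_pos h0]
      simp only [true_iff]
      exact ⟨0, h0m, fAgo_zero (k + 1) i nums⟩
    · have h0m : (0 : Int) ∉ states := fun hm => h0 ((PySem.Set.contains_iff states 0).mpr hm)
      rw [if_neg h0]
      have hmem1 : ∀ t : Int,
          t ∈ PySem.Set.ofList (states.filter (fun t => decide (0 < t))) ↔
            t ∈ states ∧ 0 < t := by
        intro t
        rw [PySem.Set.mem_ofList, List.mem_filter]
        simp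
      have hres : (∃ t ∈ states, split53Ago (k + 1) i nums t = true) ↔
          (∃ t ∈ PySem.Set.ofList (states.filter (fun t => decide (0 < t))),
             split53Ago (k + 1) i nums t = true) := by
        constructor
        · rintro ⟨t, hts, hft⟩
          have hne : t ≠ 0 := fun h => h0m (h ▸ hts)
          have hpos : 0 < t := by
            by_contra hle
            have hneg : t < 0 := by omega
            simp [fAgo_neg (k + 1) i nums t hneg] at hft
          exact ⟨t, (hmem1 t).mpr ⟨hts, hpos⟩, hft⟩
        · rintro ⟨t, hts, hft⟩
          exact ⟨t, ((hmem1 t).mp hts).1, hft⟩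
      by_cases hele : PySem.Set.ofList (states.filter (fun t => decide (0 < t))) = ([] : List Int)
      · rw [if_pos hele, hres, hele]
        simp
      · rw [if_neg hele, ih (i + 1) _ (by omega), hres]
        constructor
        · rintro ⟨t', ht', hf'⟩
          split_ifs at ht' with h5 h3
          · rw [PySem.Set.mem_ofList, List.mem_map] at ht'
            obtain ⟨t, hts, rfl⟩ := ht'
            have hpos := ((hmem1 t).mp hts).2
            refine ⟨t, hts, ?_⟩
            rw [fAgo_step k i nums t hi hpos, if_pos h5]
            exact hf'
          · rw [PySem.Set.mem_union] at ht'
            rcases ht' with ht' | ht'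
            · have hpos := ((hmem1 t').mp ht').2
              refine ⟨t', ht', ?_⟩
              rw [fAgo_step k i nums t' hi hpos, if_neg h5, if_neg h3]
              exact Or.inr hf' |> Bool.or_eq_true_iff.mpr
            · rw [PySem.Set.mem_ofList, List.mem_map] at ht'
              obtain ⟨t, hts, rfl⟩ := ht'
              have hpos := ((hmem1 t).mp hts).2
              refine ⟨t, hts, ?_⟩
              rw [fAgo_step k i nums t hi hpos, if_neg h5, if_neg h3]
              exact Or.inl hf' |> Bool.or_eq_true_iff.mpr
          · have hpos := ((hmem1 t').mp ht').2
            refine ⟨t', ht', ?_⟩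
            rw [fAgo_step k i nums t' hi hpos, if_neg h5, if_pos (not_not.mp h3)]
            exact hf'
        · rintro ⟨t, hts, hft⟩
          have hpos := ((hmem1 t).mp hts).2
          rw [fAgo_step k i nums t hi hpos] at hft
          split_ifs with h5 h3
          · rw [if_pos h5] at hft
            refine ⟨t - (PySem.List.pyGet? nums i).getD 0, ?_, hft⟩
            rw [PySem.Set.mem_ofList]
            exact List.mem_map.mpr ⟨t, hts, rfl⟩
          · rw [if_neg h5, if_neg h3] at hft
            rcases Bool.or_eq_true_iff.mp hft with hft | hft
            · refine ⟨t - (PySem.List.pyGet? nums i).getD 0, ?_, hft⟩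
              rw [PySem.Set.mem_union]
              right
              rw [PySem.Set.mem_ofList]
              exact List.mem_map.mpr ⟨t, hts, rfl⟩
            · refine ⟨t, ?_, hft⟩
              rw [PySem.Set.mem_union]
              exact Or.inl hts
          · rw [if_neg h5, if_pos (not_not.mp h3)] at hft
            exact ⟨t, hts, hft⟩

-- ===== VERDICT (by name: the statement is the Claim_ definition above) =====
theorem split_53_helper_spec : Claim_equal_split_53_helper := by
  intro start nums target _ _
  unfold Spec_split_53_helper split_53_helper split_53_helper_alt
  have h := split53AltGo_iff nums (((nums.length : Int) - start).toNat) start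
      (PySem.Set.ofList [target]) rfl
  have hsingle : ∀ t : Int, t ∈ PySem.Set.ofList [target] ↔ t = target := by
    intro t; rw [PySem.Set.mem_ofList]; simp
  rw [Bool.eq_iff_iff, h]
  constructor
  · intro hA; exact ⟨target, (hsingle target).mpr rfl, hA⟩
  · rintro ⟨t, hts, hft⟩
    rwa [(hsingle t).mp hts] at hft
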